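-- pv_equiv track=rewrite | github.com/Xxell-8/APS | 02_Algorithm/Programmers/level2_triangle_snail.py | snail_num
-- ===== SOURCE A (Python) =====
-- def snail_num(n):
--     snail = []
--     for i in range(1, n+1):
--         snail.append([0] * i)
--
--     num = 0
--     step = 1
--     col, row = -1, 0
--
--     while n > 0:
--
--         for _ in range(n):
--             col += step
--             num += 1
--             snail[col][row] = num
--         n -= 1
--
--         for _ in range(n):
--             row += step
--             num += 1
--             snail[col][row] = num
--         n -= 1
--
--         for _ in range(n):
--             col -= step
--             row -= step
--             num += 1
--             snail[col][row] = num
--         n -= 1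
--
--     result = []
--     for row in snail:
--         for num in row:
--             result.append(num)
--
--     return result
-- ===== SOURCE B (Python) =====
-- def snail_num(n):
--     # closed form: each cell's value computed directly from its position (ring index
--     # t = min(col, row-col, n-1-row), then offset along the ring), no grid, no traversal state
--     res = []
--     tot = n * (n + 1) // 2
--     for r in range(n):
--         K = n - 1 - r
--         for c in range(r + 1):
--             rc = r - c
--             t = c if c < rc else rc
--             if K < t:
--                 t = K
--             m = n - 3 * t
--             base = tot - m * (m + 1) // 2
--             if c == t:
--                 res.append(base + r - 2 * t + 1)
--             elif r - 2 * t == m - 1: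
--                 res.append(base + m + c - t)
--             else:
--                 res.append(base + 3 * m - 2 - (r - 2 * t))
--     return res
-- ===== Notes on version B (the rewrite author's own statement) =====
-- stated objective: alternative
-- what changed: Replaced the stateful spiral simulation over a mutable ragged grid by a closed-form per-cell formula: each cell's value is computed directly from its ring index and position on the ring, no grid and no traversal state.
import Mathlib
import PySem

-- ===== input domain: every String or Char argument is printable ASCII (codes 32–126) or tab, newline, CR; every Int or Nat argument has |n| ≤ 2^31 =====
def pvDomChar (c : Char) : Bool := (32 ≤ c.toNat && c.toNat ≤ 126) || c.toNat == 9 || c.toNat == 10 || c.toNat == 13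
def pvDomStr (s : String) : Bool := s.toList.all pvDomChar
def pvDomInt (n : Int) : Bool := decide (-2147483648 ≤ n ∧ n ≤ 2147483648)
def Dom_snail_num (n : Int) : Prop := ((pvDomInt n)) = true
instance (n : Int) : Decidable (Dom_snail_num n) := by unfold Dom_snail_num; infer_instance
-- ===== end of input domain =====

-- B replaces A's stateful spiral simulation over a mutable ragged grid by a closed-form
-- per-cell formula (objective: alternative; same O(n^2) cost, no grid and no traversal state).

-- ===== PORT A =====
-- snail[col][row] = num  (indices are provably in range and nonnegative whenever A executes
-- this statement, so no IndexError can occur; pySetD/pyGetD are exact there)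
def pyPlace (g : List (List Int)) (i j v : Int) : List (List Int) :=
  PySem.List.pySetD g i (PySem.List.pySetD (PySem.List.pyGetD g i []) j v)

-- state (snail, num, col, row); step = 1 throughout A's run
def sstep1 (s : List (List Int) × Int × Int × Int) (_ : Int) : List (List Int) × Int × Int × Int :=
  (pyPlace s.1 (s.2.2.1 + 1) s.2.2.2 (s.2.1 + 1), s.2.1 + 1, s.2.2.1 + 1, s.2.2.2)

def sstep2 (s : List (List Int) × Int × Int × Int) (_ : Int) : List (List Int) × Int × Int × Int :=
  (pyPlace s.1 s.2.2.1 (s.2.2.2 + 1) (s.2.1 + 1), s.2.1 + 1, s.2.2.1, s.2.2.2 + 1)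

def sstep3 (s : List (List Int) × Int × Int × Int) (_ : Int) : List (List Int) × Int × Int × Int :=
  (pyPlace s.1 (s.2.2.1 - 1) (s.2.2.2 - 1) (s.2.1 + 1), s.2.1 + 1, s.2.2.1 - 1, s.2.2.2 - 1)

-- the 'while n > 0' loop of A
def snailWhile (g : List (List Int)) (num col row n : Int) : List (List Int) :=
  if h : 0 < n then
    let s1 := (PySem.List.pyRange 0 n 1).foldl sstep1 (g, num, col, row)
    let s2 := (PySem.List.pyRange 0 (n - 1) 1).foldl sstep2 s1
    let s3 := (PySem.List.pyRange 0 (n - 2) 1).foldl sstep3 s2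
    snailWhile s3.1 s3.2.1 s3.2.2.1 s3.2.2.2 (n - 3)
  else g
termination_by n.toNat
decreasing_by omega

def snail_num (n : Int) : List Int :=
  -- snail = [[0]*i for i in range(1, n+1)] built by append
  let snail := (PySem.List.pyRange 1 (n + 1) 1).foldl
    (fun acc i => acc ++ [List.replicate i.toNat (0 : Int)]) []
  let final := snailWhile snail 0 (-1) 0 n
  -- result: flatten by nested append loops
  final.foldl (fun acc row => row.foldl (fun a x => a ++ [x]) acc) []

-- ===== PORT B =====
def snail_num_alt (n : Int) : List Int :=
  let tot := PySem.Int.floordiv (n * (n + 1)) 2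
  (PySem.List.pyRange 0 n 1).foldl (fun res r =>
    let K := n - 1 - r
    (PySem.List.pyRange 0 (r + 1) 1).foldl (fun res2 c =>
      let rc := r - c
      let t0 := if c < rc then c else rc
      let t := if K < t0 then K else t0
      let m := n - 3 * t
      let base := tot - PySem.Int.floordiv (m * (m + 1)) 2
      res2 ++ [if c = t then base + r - 2 * t + 1
               else if r - 2 * t = m - 1 then base + m + c - t
               else base + 3 * m - 2 - (r - 2 * t)]) res) []

-- ===== PRECONDITION & SPEC =====
def Spec_snail_num (n : Int) (out : List Int) : Prop := out = snail_num_alt n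
instance (n : Int) (out : List Int) : Decidable (Spec_snail_num n out) := by unfold Spec_snail_num; infer_instance

-- ===== CLAIM (what is proved, stated in full; the proofs are below) =====
def Claim_equal_snail_num : Prop := ∀ (n : Int), Dom_snail_num n → Spec_snail_num n (snail_num n)

-- ===== LEMMAS AND PROOFS =====

-- abstract triangular grid: row r has cells 0..r, filled by F
def gridOf (N : Nat) (F : Int → Int → Int) : List (List Int) :=
  (List.range N).map (fun (r : Nat) => (List.range (r + 1)).map (fun (c : Nat) => F ((r : Nat) : Int) ((c : Nat) : Int)))

-- per-cell value of B (proof-side restatement of the expression B appends)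
def cellVal (n r c : Int) : Int :=
  let tot := PySem.Int.floordiv (n * (n + 1)) 2
  let K := n - 1 - r
  let rc := r - c
  let t0 := if c < rc then c else rc
  let t := if K < t0 then K else t0
  let m := n - 3 * t
  let base := tot - PySem.Int.floordiv (m * (m + 1)) 2
  if c = t then base + r - 2 * t + 1
  else if r - 2 * t = m - 1 then base + m + c - t
  else base + 3 * m - 2 - (r - 2 * t)

-- grid contents after the first t rings have been written
def T (x : Int) : Int := PySem.Int.floordiv (x * (x + 1)) 2

def Fring (n t : Int) (r c : Int) : Int :=
  if min c (min (r - c) (n - 1 - r)) < t then cellVal n r c else 0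

lemma gridOf_congr {N : Nat} {F G : Int → Int → Int}
    (h : ∀ (r c : Nat), c ≤ r → r < N → F r c = G r c) : gridOf N F = gridOf N G := by
  unfold gridOf
  rw [List.map_inj_left]
  intro r hr
  rw [List.map_inj_left]
  intro c hc
  rw [List.mem_range] at hr hc
  exact h r c (by omega) hr

lemma set_map_range {β : Type} (m : Nat) (g : Nat → β) (a : Nat) (v : β) (_ha : a < m) :
    ((List.range m).map g).set a v = (List.range m).map (fun k => if k = a then v else g k) := by
  apply List.ext_getElem
  · simp
  · intro k hk1 hk2
    simp only [List.length_set, List.length_map, List.length_range] at hk1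
    rw [List.getElem_set]
    by_cases hk : a = k
    · subst hk
      simp
    · rw [if_neg hk]
      simp only [List.getElem_map, List.getElem_range]
      rw [if_neg (by omega)]

lemma place_eq (N : Nat) (F : Int → Int → Int) (i j v : Int)
    (hi0 : 0 ≤ i) (hiN : i < (N : Int)) (hj0 : 0 ≤ j) (hji : j ≤ i) :
    pyPlace (gridOf N F) i j v
      = gridOf N (fun r c => if r = i ∧ c = j then v else F r c) := by
  have hiN' : i.toNat < N := by omega
  have hji' : j.toNat < i.toNat + 1 := by omega
  unfold pyPlace gridOf
  rw [PySem.List.pyGetD_of_nonneg _ _ hi0, PySem.List.pySetD_of_nonneg _ _ hj0,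
      PySem.List.pySetD_of_nonneg _ _ hi0]
  rw [PySem.List.getD_map_range _ _ _ _ hiN']
  rw [set_map_range _ _ _ _ hiN']
  rw [List.map_inj_left]
  intro r hr
  rw [List.mem_range] at hr
  by_cases hri : r = i.toNat
  · subst hri
    rw [if_pos rfl]
    rw [set_map_range _ _ _ _ hji']
    rw [List.map_inj_left]
    intro c hc
    rw [List.mem_range] at hc
    by_cases hcj' : c = j.toNat
    · subst hcj'
      beta_reduce
      rw [if_pos rfl, if_pos (by constructor <;> omega)]
    · beta_reduce
      rw [if_neg hcj', if_neg (by omega)]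
  · rw [if_neg hri]
    rw [List.map_inj_left]
    intro c hc
    beta_reduce
    rw [if_neg (by omega)]

lemma loop1 (N : Nat) (l : List Int) : ∀ (F : Int → Int → Int) (num col row : Int),
    0 ≤ row → row ≤ col + 1 → col + (l.length : Int) < (N : Int) →
    l.foldl sstep1 (gridOf N F, num, col, row)
      = (gridOf N (fun r c =>
            if c = row ∧ col < r ∧ r ≤ col + (l.length : Int) then num + (r - col) else F r c),
         num + (l.length : Int), col + (l.length : Int), row) := by
  induction l with
  | nil =>
    intro F num col row h1 h2 h3
    simp only [List.foldl_nil, List.length_nil, Nat.cast_zero, add_zero]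
    have hg : gridOf N (fun r c =>
        if c = row ∧ col < r ∧ r ≤ col then num + (r - col) else F r c) = gridOf N F := by
      apply gridOf_congr
      intro r c hcr hrN
      beta_reduce
      rw [if_neg (by omega)]
    rw [hg]
  | cons x xs ih =>
    intro F num col row h1 h2 h3
    simp only [List.length_cons] at h3 ⊢
    rw [List.foldl_cons]
    have hstep : sstep1 (gridOf N F, num, col, row) x
        = (pyPlace (gridOf N F) (col + 1) row (num + 1), num + 1, col + 1, row) := rfl
    rw [hstep, place_eq N F (col + 1) row (num + 1) (by omega) (by omega) h1 (by omega)]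
    rw [ih _ (num + 1) (col + 1) row h1 (by omega) (by omega)]
    simp only [Prod.mk.injEq]
    refine ⟨?_, by push_cast; ring, by push_cast; ring, trivial⟩
    apply gridOf_congr
    intro r c hcr hrN
    beta_reduce
    split_ifs <;> first | rfl | omega | (exfalso; omega)

lemma loop2 (N : Nat) (l : List Int) : ∀ (F : Int → Int → Int) (num col row : Int),
    0 ≤ col → col < (N : Int) → 0 ≤ row → row + (l.length : Int) ≤ col →
    l.foldl sstep2 (gridOf N F, num, col, row)
      = (gridOf N (fun r c =>
            if r = col ∧ row < c ∧ c ≤ row + (l.length : Int) then num + (c - row) else F r c),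
         num + (l.length : Int), col, row + (l.length : Int)) := by
  induction l with
  | nil =>
    intro F num col row h1 h2 h3 h4
    simp only [List.foldl_nil, List.length_nil, Nat.cast_zero, add_zero]
    have hg : gridOf N (fun r c =>
        if r = col ∧ row < c ∧ c ≤ row then num + (c - row) else F r c) = gridOf N F := by
      apply gridOf_congr
      intro r c hcr hrN
      beta_reduce
      rw [if_neg (by omega)]
    rw [hg]
  | cons x xs ih =>
    intro F num col row h1 h2 h3 h4
    simp only [List.length_cons] at h4 ⊢
    rw [List.foldl_cons]
    have hstep : sstep2 (gridOf N F, num, col, row) x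
        = (pyPlace (gridOf N F) col (row + 1) (num + 1), num + 1, col, row + 1) := rfl
    rw [hstep, place_eq N F col (row + 1) (num + 1) h1 h2 (by omega) (by omega)]
    rw [ih _ (num + 1) col (row + 1) h1 h2 (by omega) (by omega)]
    simp only [Prod.mk.injEq]
    refine ⟨?_, by push_cast; ring, trivial, by push_cast; ring⟩
    apply gridOf_congr
    intro r c hcr hrN
    beta_reduce
    split_ifs <;> first | rfl | omega | (exfalso; omega)

lemma loop3 (N : Nat) (l : List Int) : ∀ (F : Int → Int → Int) (num col row : Int),
    0 ≤ row - (l.length : Int) → row ≤ col → col < (N : Int) →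
    l.foldl sstep3 (gridOf N F, num, col, row)
      = (gridOf N (fun r c =>
            if r - c = col - row ∧ col - (l.length : Int) ≤ r ∧ r ≤ col - 1 then num + (col - r) else F r c),
         num + (l.length : Int), col - (l.length : Int), row - (l.length : Int)) := by
  induction l with
  | nil =>
    intro F num col row h1 h2 h3
    simp only [List.foldl_nil, List.length_nil, Nat.cast_zero, add_zero, sub_zero]
    have hg : gridOf N (fun r c =>
        if r - c = col - row ∧ col ≤ r ∧ r ≤ col - 1 then num + (col - r) else F r c) = gridOf N F := by
      apply gridOf_congr
      intro r c hcr hrN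
      beta_reduce
      rw [if_neg (by omega)]
    rw [hg]
  | cons x xs ih =>
    intro F num col row h1 h2 h3
    simp only [List.length_cons] at h1 ⊢
    rw [List.foldl_cons]
    have hstep : sstep3 (gridOf N F, num, col, row) x
        = (pyPlace (gridOf N F) (col - 1) (row - 1) (num + 1), num + 1, col - 1, row - 1) := rfl
    rw [hstep, place_eq N F (col - 1) (row - 1) (num + 1) (by omega) (by omega) (by omega) (by omega)]
    rw [ih _ (num + 1) (col - 1) (row - 1) (by omega) (by omega) (by omega)]
    simp only [Prod.mk.injEq]
    refine ⟨?_, by push_cast; ring, by push_cast; ring, by push_cast; ring⟩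
    apply gridOf_congr
    intro r c hcr hrN
    beta_reduce
    split_ifs <;> first | rfl | omega | (exfalso; omega)

lemma T_rec (m : Int) : T m = T (m - 3) + 3 * m - 3 := by
  simp only [T]
  rw [PySem.Int.floordiv_eq_ediv_of_pos (by norm_num : (0:ℤ) < 2),
      PySem.Int.floordiv_eq_ediv_of_pos (by norm_num : (0:ℤ) < 2)]
  have h : m * (m + 1) = (m - 3) * (m - 3 + 1) + (3 * m - 3) * 2 := by ring
  rw [h, Int.add_mul_ediv_right _ _ (by norm_num : (2:ℤ) ≠ 0)]
  ring

lemma cellVal_of_left (n r c t : Int) (h1 : c = t) (h2 : t ≤ r - c) (h3 : t ≤ n - 1 - r) :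
    cellVal n r c = T n - T (n - 3 * t) + (r - 2 * t) + 1 := by
  have e : (if (n - 1 - r) < (if c < r - c then c else r - c) then (n - 1 - r)
      else (if c < r - c then c else r - c)) = t := by split_ifs <;> omega
  simp only [cellVal, T]
  rw [e, if_pos h1]
  ring

lemma cellVal_of_bottom (n r c t : Int) (h1 : n - 1 - r = t) (h2 : t < c) (h3 : t ≤ r - c) :
    cellVal n r c = T n - T (n - 3 * t) + (n - 3 * t) + (c - t) := by
  have e : (if (n - 1 - r) < (if c < r - c then c else r - c) then (n - 1 - r)
      else (if c < r - c then c else r - c)) = t := by split_ifs <;> omega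
  simp only [cellVal, T]
  rw [e, if_neg (by omega), if_pos (by omega)]
  ring

lemma cellVal_of_diag (n r c t : Int) (h1 : r - c = t) (h2 : t < c) (h3 : t + 1 ≤ n - 1 - r) :
    cellVal n r c = T n - T (n - 3 * t) + 3 * (n - 3 * t) - 2 - (r - 2 * t) := by
  have e : (if (n - 1 - r) < (if c < r - c then c else r - c) then (n - 1 - r)
      else (if c < r - c then c else r - c)) = t := by split_ifs <;> omega
  simp only [cellVal, T]
  rw [e, if_neg (by omega), if_neg (by omega)]

lemma snailWhile_grid_congr {g g' : List (List Int)} (h : g = g') (num col row n : Int) :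
    snailWhile g num col row n = snailWhile g' num col row n := by rw [h]

-- the while loop is over once n - 3*t ≤ 0; every cell is then inside a completed ring
lemma while_base (n t num col row : Int) (ht : 0 ≤ t) (h : n - 3 * t ≤ 0) :
    snailWhile (gridOf n.toNat (Fring n t)) num col row (n - 3 * t)
      = gridOf n.toNat (fun r c => cellVal n r c) := by
  rw [snailWhile, dif_neg (by omega)]
  apply gridOf_congr
  intro r c hcr hrN
  beta_reduce
  unfold Fring
  rw [if_pos (by omega)]

-- one full ring of the spiral turns the t-ring grid into the (t+1)-ring grid
lemma ring_iter (n t num : Int) (ht : 0 ≤ t) (hm : 0 < n - 3 * t)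
    (hnum : num = T n - T (n - 3 * t)) :
    ∃ num' col' row',
      snailWhile (gridOf n.toNat (Fring n t)) num (2 * t - 1) t (n - 3 * t)
        = snailWhile (gridOf n.toNat (Fring n (t + 1))) num' col' row' (n - 3 * t - 3)
      ∧ (0 < n - 3 * t - 3 →
          num' = T n - T (n - 3 * t - 3) ∧ col' = 2 * (t + 1) - 1 ∧ row' = t + 1) := by
  have hn : 0 < n := by omega
  have hlen1 : (((PySem.List.pyRange 0 (n - 3 * t) 1).length : Nat) : Int) = n - 3 * t := by
    rw [PySem.List.length_pyRange_one]; omega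
  have hlen2 : (((PySem.List.pyRange 0 (n - 3 * t - 1) 1).length : Nat) : Int)
      = max (n - 3 * t - 1) 0 := by
    rw [PySem.List.length_pyRange_one]; omega
  have hlen3 : (((PySem.List.pyRange 0 (n - 3 * t - 2) 1).length : Nat) : Int)
      = max (n - 3 * t - 2) 0 := by
    rw [PySem.List.length_pyRange_one]; omega
  rw [snailWhile, dif_pos hm]
  dsimp only
  rw [loop1 n.toNat _ (Fring n t) num (2 * t - 1) t ht (by omega) (by omega)]
  rw [loop2 n.toNat _ _ (num + _) (2 * t - 1 + _) t (by omega) (by omega) ht (by omega)]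
  rw [loop3 n.toNat _ _ _ _ _ (by omega) (by omega) (by omega)]
  dsimp only
  refine ⟨_, _, _, snailWhile_grid_congr (gridOf_congr ?_) _ _ _ _, ?_⟩
  · intro r c hcr hrN
    beta_reduce
    by_cases h0 : min ((c : Nat) : Int) (min (((r : Nat) : Int) - c) (n - 1 - ((r : Nat) : Int))) < t
    · rw [if_neg (by omega), if_neg (by omega), if_neg (by omega)]
      unfold Fring
      rw [if_pos h0, if_pos (by omega)]
    · by_cases h1' : min ((c : Nat) : Int) (min (((r : Nat) : Int) - c) (n - 1 - ((r : Nat) : Int))) = t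
      · by_cases hL : ((c : Nat) : Int) = t
        · rw [if_neg (by omega), if_neg (by omega), if_pos (by omega)]
          unfold Fring
          rw [if_pos (by omega), cellVal_of_left n r c t hL (by omega) (by omega), hnum]
          generalize T n - T (n - 3 * t) = B
          omega
        · by_cases hB : n - 1 - ((r : Nat) : Int) = t
          · rw [if_neg (by omega), if_pos (by omega)]
            unfold Fring
            rw [if_pos (by omega), cellVal_of_bottom n r c t hB (by omega) (by omega), hnum]
            generalize T n - T (n - 3 * t) = B
            omega
          · rw [if_pos (by omega)]
            unfold Fring
            rw [if_pos (by omega), cellVal_of_diag n r c t (by omega) (by omega) (by omega), hnum]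
            generalize T n - T (n - 3 * t) = B
            omega
      · rw [if_neg (by omega), if_neg (by omega), if_neg (by omega)]
        unfold Fring
        rw [if_neg h0, if_neg (by omega)]
  · intro h3
    have trec := T_rec (n - 3 * t)
    refine ⟨?_, by omega, by omega⟩
    rw [hnum]
    have harg : n - 3 * t - 3 = n - 3 * t - 3 := rfl
    generalize hA : T n = A at *
    generalize hB : T (n - 3 * t) = B at *
    generalize hC : T (n - 3 * t - 3) = C at *
    omega

lemma while_eq (n : Int) : ∀ (k : Nat) (t num col row m : Int), 0 ≤ t → m = n - 3 * t →
    col = 2 * t - 1 → row = t → m.toNat ≤ k → (0 < m → num = T n - T m) →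
    snailWhile (gridOf n.toNat (Fring n t)) num col row m
      = gridOf n.toNat (fun r c => cellVal n r c) := by
  intro k
  induction k with
  | zero =>
    intro t num col row m ht hm hcol hrow hk hnum
    subst hm
    exact while_base n t num _ _ ht (by omega)
  | succ k ih =>
    intro t num col row m ht hm hcol hrow hk hnum
    subst hm
    rw [hcol, hrow]
    by_cases hpos : 0 < n - 3 * t
    · obtain ⟨num', col', row', heq, hprops⟩ := ring_iter n t num ht hpos (hnum hpos)
      rw [heq]
      by_cases hm3 : 0 < n - 3 * t - 3
      · obtain ⟨e1, e2, e3⟩ := hprops hm3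
        have harg : n - 3 * t - 3 = n - 3 * (t + 1) := by ring
        rw [harg] at heq e1 ⊢
        exact ih (t + 1) num' col' row' _ (by omega) rfl e2 e3 (by omega) (fun _ => e1)
      · have harg : n - 3 * t - 3 = n - 3 * (t + 1) := by ring
        rw [harg]
        exact while_base n (t + 1) num' col' row' (by omega) (by omega)
    · exact while_base n t num _ _ ht (by omega)

-- ===== VERDICT (by name: the statement is the Claim_ definition above) =====
theorem snail_num_spec : Claim_equal_snail_num := by
  unfold Claim_equal_snail_num Spec_snail_num
  intro n _
  unfold snail_num
  dsimp only
  have hinit : (PySem.List.pyRange 1 (n + 1) 1).foldl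
      (fun acc i => acc ++ [List.replicate i.toNat (0 : Int)]) []
      = gridOf n.toNat (fun _ _ => (0 : Int)) := by
    rw [PySem.List.foldl_append_singleton_eq_map, List.nil_append, PySem.List.pyRange_one,
        show n + 1 - 1 = n from by ring, List.map_map]
    unfold gridOf
    rw [List.map_inj_left]
    intro k hk
    rw [List.mem_range] at hk
    show List.replicate ((1 + (k : Int)).toNat) 0 = _
    rw [show ((1 : Int) + (k : Int)).toNat = k + 1 from by omega]
    symm
    rw [List.map_const', List.length_range]
  have h0 : gridOf n.toNat (fun _ _ => (0 : Int)) = gridOf n.toNat (Fring n 0) := by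
    apply gridOf_congr
    intro r c hcr hrN
    beta_reduce
    unfold Fring
    rw [if_neg (by omega)]
  rw [hinit, h0]
  rw [while_eq n n.toNat 0 0 (-1) 0 n le_rfl (by ring) (by norm_num) rfl le_rfl
      (fun _ => (sub_self (T n)).symm)]
  have hflat : ∀ (g : List (List Int)) (acc : List Int),
      g.foldl (fun acc row => row.foldl (fun a x => a ++ [x]) acc) acc = acc ++ g.flatten := by
    intro g
    induction g with
    | nil => intro acc; simp
    | cons hd tl ih =>
      intro acc
      rw [List.foldl_cons, PySem.List.foldl_append_singleton_eq_self, ih, List.flatten_cons,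
          List.append_assoc]
  rw [hflat, List.nil_append]
  unfold snail_num_alt
  dsimp only
  simp only [PySem.List.foldl_append_singleton_eq_map]
  rw [PySem.List.foldl_append_eq_flatMap, List.nil_append]
  rw [PySem.List.pyRange_one 0 n, show n - 0 = n from by ring, List.flatMap_map]
  unfold gridOf
  rw [← List.flatMap_def]
  rw [List.flatMap_def, List.flatMap_def]
  congr 1
  rw [List.map_inj_left]
  intro k hk
  rw [List.mem_range] at hk
  beta_reduce
  simp only [zero_add]
  rw [PySem.List.pyRange_one, List.map_map]
  rw [show ((k : Int) + 1 - 0).toNat = k + 1 from by omega]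
  rw [List.map_inj_left]
  intro c hc
  simp only [Function.comp_apply, zero_add]
  rfl
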